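-- pv_equiv track=rewrite | github.com/hoahai/fastapi | apps/tradsphere/api/v1/helpers/dbQueries.py | _normalized_int_cache_values
-- ===== SOURCE A (Python) =====
-- def _normalized_int_cache_values(values: list[int]) -> list[int]:
--     seen: set[int] = set()
--     normalized: list[int] = []
--     for value in values:
--         parsed = int(value)
--         if parsed in seen:
--             continue
--         seen.add(parsed)
--         normalized.append(parsed)
--     return sorted(normalized)
-- ===== SOURCE B (Python) =====
-- def _normalized_int_cache_values(values: list[int]) -> list[int]:
--     parsed = [int(v) for v in values]
--     parsed.sort()
--     out: list[int] = []
--     for v in parsed: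
--         if not out or out[-1] != v:
--             out.append(v)
--     return out
-- ===== Notes on version B (the rewrite author's own statement) =====
-- stated objective: alternative
-- what changed: B sorts the parsed list first and removes consecutive duplicates in one linear pass, instead of A's hash-set dedup in input order followed by a final sort; no set is maintained.
import Mathlib
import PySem

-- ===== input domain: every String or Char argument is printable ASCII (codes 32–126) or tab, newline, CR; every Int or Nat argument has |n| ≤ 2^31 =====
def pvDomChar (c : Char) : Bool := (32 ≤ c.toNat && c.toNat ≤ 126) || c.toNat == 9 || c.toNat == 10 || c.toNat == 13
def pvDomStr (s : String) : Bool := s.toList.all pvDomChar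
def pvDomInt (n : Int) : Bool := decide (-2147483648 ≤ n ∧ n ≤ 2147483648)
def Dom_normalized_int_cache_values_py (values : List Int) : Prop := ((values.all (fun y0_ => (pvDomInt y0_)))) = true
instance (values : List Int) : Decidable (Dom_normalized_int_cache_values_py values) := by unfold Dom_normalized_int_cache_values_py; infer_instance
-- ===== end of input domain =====

-- B sorts the parsed list first and removes consecutive duplicates in one linear pass,
-- instead of A's set-based dedup in input order followed by a final sort (alternative decomposition, same cost).

-- ===== PORT A =====
-- for value in values: parsed = int(value); if parsed in seen: continue; seen.add(parsed); normalized.append(parsed)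
def normalized_int_cache_values_py (values : List Int) : List Int :=
  let st := values.foldl (fun (st : PySem.Set Int × List Int) value =>
    let parsed := value  -- int(value) on an int is the identity
    if PySem.Set.contains st.1 parsed then st
    else (PySem.Set.add st.1 parsed, st.2 ++ [parsed])) (PySem.Set.empty, [])
  PySem.List.sorted st.2 (fun x => x) false

-- ===== PORT B =====
-- parsed = [int(v) for v in values]; parsed.sort(); one pass appending v unless out[-1] == v
def normalized_int_cache_values_py_alt (values : List Int) : List Int :=
  let parsed := values.map (fun v => v)  -- int(v) on an int is the identity
  let sortedParsed := PySem.List.sorted parsed (fun x => x) false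
  sortedParsed.foldl (fun (out : List Int) v =>
    if out.getLast? = some v then out else out ++ [v]) []

-- ===== PRECONDITION & SPEC =====
def Spec_normalized_int_cache_values_py (values : List Int) (out : List Int) : Prop := out = normalized_int_cache_values_py_alt values
instance (values : List Int) (out : List Int) : Decidable (Spec_normalized_int_cache_values_py values out) := by unfold Spec_normalized_int_cache_values_py; infer_instance

-- ===== CLAIM (what is proved, stated in full; the proofs are below) =====
def Claim_equal_normalized_int_cache_values_py : Prop := ∀ (values : List Int), Dom_normalized_int_cache_values_py values → Spec_normalized_int_cache_values_py values (normalized_int_cache_values_py values)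

-- ===== LEMMAS AND PROOFS =====

-- A's fold keeps seen and normalized equal as lists, so normalized = set(values) as built by Set.add.
theorem pvA_fold_eq (values : List Int) (s : PySem.Set Int) :
    values.foldl (fun (st : PySem.Set Int × List Int) value =>
      if PySem.Set.contains st.1 value then st
      else (PySem.Set.add st.1 value, st.2 ++ [value])) (s, s)
    = (values.foldl PySem.Set.add s, values.foldl PySem.Set.add s) := by
  induction values generalizing s with
  | nil => rfl
  | cons v t ih =>
    simp only [List.foldl_cons]
    by_cases h : v ∈ s
    · have h1 : PySem.Set.contains s v = true := (PySem.Set.contains_iff _ _).mpr h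
      have h2 : PySem.Set.add s v = s := PySem.Set.add_of_mem h
      simp only [h1, if_pos, h2]
      exact ih s
    · have h1 : ¬ PySem.Set.contains s v = true := fun hc => h ((PySem.Set.contains_iff _ _).mp hc)
      have h2 : PySem.Set.add s v = s ++ [v] := PySem.Set.add_of_not_mem h
      simp only [h1, h2]
      exact ih (s ++ [v])

theorem pvA_eq_sorted_set (values : List Int) :
    normalized_int_cache_values_py values
    = PySem.List.sorted (PySem.Set.ofList values) (fun x => x) false := by
  unfold normalized_int_cache_values_py
  have h := pvA_fold_eq values []
  simp only [PySem.Set.empty] at *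
  rw [h]
  rw [PySem.Set.ofList_eq_foldl]

-- The adjacent-dedup fold over a ≤-sorted list: invariant on the accumulator.
theorem pvB_fold_invariant (l acc : List Int)
    (hl : l.Pairwise (· ≤ ·))
    (hacc : acc.Pairwise (· < ·))
    (hle : ∀ a ∈ acc, ∀ x ∈ l, a ≤ x) :
    (l.foldl (fun (out : List Int) v =>
        if out.getLast? = some v then out else out ++ [v]) acc).Pairwise (· < ·)
    ∧ (∀ y, y ∈ l.foldl (fun (out : List Int) v =>
        if out.getLast? = some v then out else out ++ [v]) acc ↔ y ∈ acc ∨ y ∈ l) := by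
  induction l generalizing acc with
  | nil => simpa using hacc
  | cons v t ih =>
    rw [List.pairwise_cons] at hl
    obtain ⟨hv, ht⟩ := hl
    simp only [List.foldl_cons]
    by_cases h : acc.getLast? = some v
    · have hvmem : v ∈ acc := List.mem_of_getLast? h
      have := ih acc ht hacc (fun a ha x hx => hle a ha x (List.mem_cons_of_mem _ hx))
      rw [if_pos h]
      refine ⟨this.1, fun y => ?_⟩
      rw [this.2 y]
      constructor
      · rintro (hy | hy)
        · exact Or.inl hy
        · exact Or.inr (List.mem_cons_of_mem _ hy)
      · rintro (hy | hy)
        · exact Or.inl hy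
        · rcases List.mem_cons.mp hy with rfl | hy
          · exact Or.inl hvmem
          · exact Or.inr hy
    · rw [if_neg h]
      -- every a ∈ acc is < v: a ≤ v by hle, and a = v would force getLast? = some v
      have hlt : ∀ a ∈ acc, a < v := by
        intro a ha
        have hav : a ≤ v := hle a ha v (List.mem_cons_self)
        rcases eq_or_lt_of_le hav with rfl | hlt
        · -- a = v ∈ acc, acc pairwise <, so v ≤ last acc ≤ v, i.e. last = v, contradicting h
          exfalso
          have hne : acc ≠ [] := List.ne_nil_of_mem ha
          have hwmem : acc.getLast hne ∈ acc := List.getLast_mem hne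
          have hwv : acc.getLast hne ≤ a := hle _ hwmem a (List.mem_cons_self)
          have haw : a ≤ acc.getLast hne := by
            have hdc : acc.dropLast ++ [acc.getLast hne] = acc := List.dropLast_concat_getLast hne
            have hpw := hacc
            rw [← hdc, List.pairwise_append] at hpw
            rcases (by rw [← hdc] at ha; exact List.mem_append.mp ha) with ha' | ha'
            · exact le_of_lt (hpw.2.2 a ha' _ (List.mem_singleton_self _))
            · simp at ha'; omega
          have : acc.getLast? = some a := by
            rw [List.getLast?_eq_some_getLast hne]
            exact congrArg some (le_antisymm hwv haw)
          exact h this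
        · exact hlt
      have hpw : (acc ++ [v]).Pairwise (· < ·) := by
        rw [List.pairwise_append]
        exact ⟨hacc, List.pairwise_singleton _ _, by simpa using hlt⟩
      have hle' : ∀ a ∈ acc ++ [v], ∀ x ∈ t, a ≤ x := by
        intro a ha x hx
        rcases List.mem_append.mp ha with ha | ha
        · exact hle a ha x (List.mem_cons_of_mem _ hx)
        · have : a = v := by simpa using ha
          subst this; exact hv x hx
      have := ih (acc ++ [v]) ht hpw hle'
      refine ⟨this.1, fun y => ?_⟩
      rw [this.2 y]
      constructor
      · rintro (hy | hy)
        · rcases List.mem_append.mp hy with hy | hy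
          · exact Or.inl hy
          · have : y = v := by simpa using hy
            exact Or.inr (this ▸ List.mem_cons_self)
        · exact Or.inr (List.mem_cons_of_mem _ hy)
      · rintro (hy | hy)
        · exact Or.inl (List.mem_append.mpr (Or.inl hy))
        · rcases List.mem_cons.mp hy with rfl | hy
          · exact Or.inl (List.mem_append.mpr (Or.inr (List.mem_singleton_self _)))
          · exact Or.inr hy

-- ===== VERDICT (by name: the statement is the Claim_ definition above) =====
theorem normalized_int_cache_values_py_spec : Claim_equal_normalized_int_cache_values_py := by
  intro values _
  unfold Spec_normalized_int_cache_values_py normalized_int_cache_values_py_alt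
  simp only [List.map_id']
  rw [pvA_eq_sorted_set]
  have hsorted : (PySem.List.sorted values (fun x => x) false).Pairwise (· ≤ ·) := by
    simpa using PySem.List.sorted_pairwise (xs := values) (key := fun x => x)
  obtain ⟨hpw, hmem⟩ := pvB_fold_invariant (PySem.List.sorted values (fun x => x) false) []
    hsorted (List.Pairwise.nil) (by simp)
  apply PySem.List.sorted_eq_of_perm_of_pairwise_lt
  · -- perm with Set.ofList values
    rw [List.perm_ext_iff_of_nodup hpw.nodup (PySem.Set.nodup_ofList values)]
    intro y
    rw [hmem y]
    simp [PySem.Set.mem_ofList, PySem.List.mem_sorted]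
  · exact hpw
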